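-- pv_equiv track=rewrite | github.com/AluminumShark/2023_Programming_for_Business_Computing | hw_05/hw_05_1.py | troughs
-- ===== SOURCE A (Python) =====
-- def dupl(alist) :
--     return len(alist) != len(set(alist))
--
-- def troughs(inlist, k = 2) :
--     num = list()
--     for i in range(k, len(inlist) - k) :
--         if dupl(inlist[i - k : i + 1]) == True or dupl(inlist[i : i + k + 1]) == True :
--              continue
--         elif inlist[i - k : i + 1] == sorted(inlist[i - k : i + 1], reverse = True) \
--                 and inlist[i : i + k + 1] == sorted(inlist[i : i + k + 1]):
--                 num.append(i)
--     return num
-- ===== SOURCE B (Python) =====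
-- def _runs(a):
--     # out[i] = length of the strictly decreasing run of a ending at index i
--     out = []
--     run = 0
--     prev = None
--     for x in a:
--         run = run + 1 if prev is not None and prev > x else 1
--         out.append(run)
--         prev = x
--     return out
--
-- def troughs(inlist, k=2):
--     n = len(inlist)
--     if n < 2 * k + 1:
--         return []          # no index has k neighbours on both sides
--     dec = _runs(inlist)                    # strictly decreasing run ending at i
--     inc = _runs(inlist[::-1])[::-1]        # strictly increasing run starting at i
--     t = k + 1
--     return [i for i in range(k, n - k) if dec[i] >= t and inc[i] >= t]
-- ===== Notes on version B (the rewrite author's own statement) =====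
-- stated objective: alternative
-- what changed: replaces the per-index window duplicate test plus two window sorts with two precomputed strictly-decreasing/strictly-increasing run-length arrays compared against k+1 in one pass (O(n) instead of O(n*k log k), though not measurably faster in CPython at the probe sizes)
-- outside the precondition, e.g. on troughs([1, 2, 3], -1): A returns [-1, 0, 1, 2, 3], B raises IndexError
import Mathlib
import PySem

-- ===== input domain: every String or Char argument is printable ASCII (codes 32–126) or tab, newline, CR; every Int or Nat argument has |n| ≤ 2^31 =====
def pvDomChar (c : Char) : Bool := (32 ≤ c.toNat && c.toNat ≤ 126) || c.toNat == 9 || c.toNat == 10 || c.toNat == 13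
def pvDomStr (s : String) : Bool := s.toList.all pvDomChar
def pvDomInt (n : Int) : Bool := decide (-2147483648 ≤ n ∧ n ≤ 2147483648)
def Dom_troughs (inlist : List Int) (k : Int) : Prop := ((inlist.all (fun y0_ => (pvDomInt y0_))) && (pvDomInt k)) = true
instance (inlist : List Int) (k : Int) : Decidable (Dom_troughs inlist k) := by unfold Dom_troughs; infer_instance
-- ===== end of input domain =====

-- B replaces A's per-index window duplicate test and two window sorts by two precomputed
-- strictly-monotone run-length arrays checked against k+1 (objective: alternative algorithm).

-- ===== PORT A =====
def pvDupl (alist : List Int) : Bool :=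
  decide (alist.length ≠ (PySem.Set.ofList alist).length)

def troughs (inlist : List Int) (k : Int) : List Int :=
  (PySem.List.pyRange k ((inlist.length : Int) - k) 1).foldl
    (fun num i =>
      if (pvDupl (PySem.List.slice inlist (some (i - k)) (some (i + 1))) == true
          || pvDupl (PySem.List.slice inlist (some i) (some (i + k + 1))) == true) = true then num
      else if PySem.List.slice inlist (some (i - k)) (some (i + 1))
                = PySem.List.sorted (PySem.List.slice inlist (some (i - k)) (some (i + 1))) (fun x => x) true
              ∧ PySem.List.slice inlist (some i) (some (i + k + 1))
                = PySem.List.sorted (PySem.List.slice inlist (some i) (some (i + k + 1))) (fun x => x) false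
      then num ++ [i]
      else num) []

-- ===== PORT B =====
-- _runs: fold state = (out, run, prev); prev = none models Python's prev = None
def pvRunsStep (s : List Int × Int × Option Int) (x : Int) : List Int × Int × Option Int :=
  let run : Int := match s.2.2 with
    | some p => if p > x then s.2.1 + 1 else 1
    | none => 1
  (s.1 ++ [run], run, some x)

def pvRuns (a : List Int) : List Int := (a.foldl pvRunsStep ([], 0, none)).1

def troughs_alt (inlist : List Int) (k : Int) : List Int :=
  let n : Int := inlist.length
  if n < 2 * k + 1 then []   -- no index has k neighbours on both sides
  else
  let dec := pvRuns inlist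
  let inc := (pvRuns inlist.reverse).reverse
  let t := k + 1
  -- dec[i] / inc[i]: under Pre_ (0 ≤ k) the index i is always in range, so getD 0 is exact there
  (PySem.List.pyRange k (n - k) 1).filter
    (fun i => decide (t ≤ PySem.List.pyGetD dec i 0) && decide (t ≤ PySem.List.pyGetD inc i 0))

-- ===== PRECONDITION & SPEC =====
-- Pre_ excludes negative k (not a meaningful window size): there A's negative slice bounds
-- wrap around and return accidental index lists, while B's run-length array indexing raises
-- IndexError.
def Pre_troughs (inlist : List Int) (k : Int) : Prop := 0 ≤ k
instance (inlist : List Int) (k : Int) : Decidable (Pre_troughs inlist k) := by unfold Pre_troughs; infer_instance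
def pvWitness_troughs : List Int × Int := ([5, 3, 1, 2, 4], 2)

def Spec_troughs (inlist : List Int) (k : Int) (out : List Int) : Prop := out = troughs_alt inlist k
instance (inlist : List Int) (k : Int) (out : List Int) : Decidable (Spec_troughs inlist k out) := by unfold Spec_troughs; infer_instance

-- ===== CLAIM (what is proved, stated in full; the proofs are below) =====
def Claim_equal_troughs : Prop := ∀ (inlist : List Int) (k : Int), Dom_troughs inlist k → Pre_troughs inlist k → Spec_troughs inlist k (troughs inlist k)

-- ===== LEMMAS AND PROOFS =====

-- decRun a i = the value dec[i] that B's _runs computes (Nat-indexed spec of the scan)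
def decRun (a : List Int) : Nat → Nat
  | 0 => 1
  | i + 1 => if a.getD (i + 1) 0 < a.getD i 0 then decRun a i + 1 else 1

theorem decRun_pos (a : List Int) (i : Nat) : 1 ≤ decRun a i := by
  cases i with
  | zero => simp [decRun]
  | succ m => simp only [decRun]; split <;> omega

-- the foldl invariant of B's _runs loop
theorem pvRuns_foldl (a : List Int) (s : Nat) (out : List Int) (hs : 1 ≤ s) (hq : s ≤ a.length) :
    ((a.drop s).foldl pvRunsStep (out, ((decRun a (s - 1) : Nat) : Int), some (a.getD (s - 1) 0))).1
      = out ++ (List.range' s (a.length - s)).map (fun m => ((decRun a m : Nat) : Int)) := by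
  induction hd : a.length - s generalizing s out with
  | zero =>
    have : a.drop s = [] := by rw [List.drop_eq_nil_iff]; omega
    simp [this]
  | succ n ih =>
    have hlt : s < a.length := by omega
    have hdrop : a.drop s = a[s] :: a.drop (s + 1) := List.drop_eq_getElem_cons hlt
    rw [hdrop, List.foldl_cons]
    have hstep : pvRunsStep (out, ((decRun a (s - 1) : Nat) : Int), some (a.getD (s - 1) 0)) a[s]
        = (out ++ [((decRun a s : Nat) : Int)], ((decRun a s : Nat) : Int), some (a.getD s 0)) := by
      simp only [pvRunsStep]
      obtain ⟨m, rfl⟩ : ∃ m, s = m + 1 := ⟨s - 1, by omega⟩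
      have hget : a[m + 1] = a.getD (m + 1) 0 := (List.getD_eq_getElem a 0 hlt).symm
      simp only [Nat.add_sub_cancel, hget]
      simp [decRun, gt_iff_lt]
    rw [hstep]
    have := ih (s + 1) (out ++ [((decRun a s : Nat) : Int)]) (by omega) (by omega) (by omega)
    simp only [Nat.add_sub_cancel] at this
    rw [this, List.range'_succ]
    simp

theorem pvRuns_eq (a : List Int) :
    pvRuns a = (List.range a.length).map (fun m => ((decRun a m : Nat) : Int)) := by
  cases a with
  | nil => simp [pvRuns]
  | cons x xs =>
    show ((x :: xs).foldl pvRunsStep ([], 0, none)).1 = _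
    rw [List.foldl_cons]
    have h1 : pvRunsStep ([], 0, none) x = ([(1 : Int)], (1 : Int), some x) := by
      simp [pvRunsStep]
    have h3 : ([(1 : Int)], (1 : Int), some x)
        = ([((decRun (x :: xs) 0 : Nat) : Int)], ((decRun (x :: xs) (1 - 1) : Nat) : Int), some ((x :: xs).getD (1 - 1) 0)) := by
      simp [decRun]
    rw [h1, h3]
    have h4 := pvRuns_foldl (x :: xs) 1 [((decRun (x :: xs) 0 : Nat) : Int)] (by omega) (by simp)
    simp only [List.drop_succ_cons, List.drop_zero] at h4
    rw [h4, List.range_eq_range']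
    show _ = List.map _ (List.range' 0 (xs.length + 1))
    rw [List.range'_succ]
    simp [decRun]

-- decRun ≥ t+1 iff the t preceding adjacent steps are strictly decreasing
theorem decRun_ge_iff (a : List Int) (t i : Nat) (ht : t ≤ i) :
    (t + 1 ≤ decRun a i) ↔ ∀ j, i - t ≤ j → j < i → a.getD (j + 1) 0 < a.getD j 0 := by
  induction t generalizing i with
  | zero =>
    simp only [Nat.zero_add]
    constructor
    · intro _ j hj1 hj2; omega
    · intro _; exact decRun_pos a i
  | succ t ih =>
    obtain ⟨m, rfl⟩ : ∃ m, i = m + 1 := ⟨i - 1, by omega⟩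
    simp only [decRun]
    by_cases h : a.getD (m + 1) 0 < a.getD m 0
    · rw [if_pos h]
      have hiff := ih m (by omega)
      constructor
      · intro hge j hj1 hj2
        rcases Nat.lt_or_ge j m with hj | hj
        · exact hiff.mp (by omega) j (by omega) hj
        · have : j = m := by omega
          subst this; exact h
      · intro hall
        have : t + 1 ≤ decRun a m := (ih m (by omega)).mpr (fun j h1 h2 => hall j (by omega) (by omega))
        omega
    · rw [if_neg h]
      constructor
      · intro hge; omega
      · intro hall
        exact absurd (hall m (by omega) (by omega)) h

-- window of length t+1 is R-pairwise iff the t adjacent steps satisfy R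
theorem pairwise_window_iff (R : Int → Int → Prop) [Trans R R R] (a : List Int) (lo t : Nat)
    (h : lo + t < a.length) :
    ((a.drop lo).take (t + 1)).Pairwise R
      ↔ ∀ j, lo ≤ j → j < lo + t → R (a.getD j 0) (a.getD (j + 1) 0) := by
  have hlen : ((a.drop lo).take (t + 1)).length = t + 1 := by
    simp; omega
  rw [← List.isChain_iff_pairwise, List.isChain_iff_getElem]
  constructor
  · intro hc j hj1 hj2
    have hm : (j - lo) + 1 < ((a.drop lo).take (t + 1)).length := by omega
    have := hc (j - lo) hm
    rw [List.getElem_take, List.getElem_drop] at this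
    rw [List.getElem_take, List.getElem_drop] at this
    rw [List.getD_eq_getElem a 0 (by omega), List.getD_eq_getElem a 0 (by omega)]
    convert this using 2 <;> omega
  · intro hall i hi
    rw [List.getElem_take, List.getElem_drop, List.getElem_take, List.getElem_drop]
    have := hall (lo + i) (by omega) (by omega)
    rw [List.getD_eq_getElem a 0 (by omega), List.getD_eq_getElem a 0 (by omega)] at this
    convert this using 2

theorem pvDupl_eq_false_iff (l : List Int) : pvDupl l = false ↔ l.Nodup := by
  unfold pvDupl
  constructor
  · intro h
    have hlen : l.length = (PySem.Set.ofList l).length := by simpa using h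
    have hperm : (PySem.Set.ofList l).Perm l.dedup :=
      (List.perm_ext_iff_of_nodup (PySem.Set.nodup_ofList l) l.nodup_dedup).mpr
        (by intro x; simp [PySem.Set.mem_ofList, List.mem_dedup])
    have hd : l.dedup = l :=
      (List.dedup_sublist l).eq_of_length (by rw [← hperm.length_eq]; omega)
    exact List.dedup_eq_self.mp hd
  · intro h
    rw [PySem.Set.ofList_eq_self_of_nodup l h]
    simp

theorem cond_desc (l : List Int) :
    (pvDupl l = false ∧ l = PySem.List.sorted l (fun x => x) true) ↔ l.Pairwise (· > ·) := by
  rw [pvDupl_eq_false_iff]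
  constructor
  · rintro ⟨hnd, heq⟩
    have hp := PySem.List.sorted_pairwise_rev l (fun x => x)
    rw [← heq] at hp
    exact (hp.and hnd).imp (fun h => lt_of_le_of_ne h.1 (Ne.symm h.2))
  · intro hp
    refine ⟨hp.imp (fun h => ne_of_gt h), ?_⟩
    exact (PySem.List.sorted_rev_eq_of_perm_of_pairwise_gt l l (fun x => x) (List.Perm.refl l) hp).symm

theorem cond_asc (l : List Int) :
    (pvDupl l = false ∧ l = PySem.List.sorted l (fun x => x) false) ↔ l.Pairwise (· < ·) := by
  rw [pvDupl_eq_false_iff]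
  constructor
  · rintro ⟨hnd, heq⟩
    have hp := PySem.List.sorted_pairwise l (fun x => x)
    rw [← heq] at hp
    exact (hp.and hnd).imp (fun h => lt_of_le_of_ne h.1 h.2)
  · intro hp
    refine ⟨hp.imp (fun h => ne_of_lt h), ?_⟩
    exact (PySem.List.sorted_eq_of_perm_of_pairwise_lt l l (fun x => x) (List.Perm.refl l) hp).symm

theorem getD_reverse (a : List Int) (j : Nat) (hj : j < a.length) :
    a.reverse.getD j 0 = a.getD (a.length - 1 - j) 0 := by
  rw [List.getD_eq_getElem a.reverse 0 (by simpa using hj),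
      List.getD_eq_getElem a 0 (by omega), List.getElem_reverse]

-- ===== VERDICT (by name: the statement is the Claim_ definition above) =====
theorem troughs_spec : Claim_equal_troughs := by
  intro inlist k _ hk
  obtain ⟨K, rfl⟩ : ∃ K : Nat, k = (K : Int) := ⟨k.toNat, (Int.toNat_of_nonneg hk).symm⟩
  unfold Spec_troughs troughs troughs_alt
  simp only []
  by_cases hsmall : (inlist.length : Int) < 2 * (K : Int) + 1
  · rw [if_pos hsmall, PySem.List.pyRange_one_eq_nil (by omega), List.foldl_nil]
  rw [if_neg hsmall]
  -- A's loop body as a single conditional append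
  rw [show (fun (num : List Int) (i : Int) =>
      if (pvDupl (PySem.List.slice inlist (some (i - K)) (some (i + 1))) == true
          || pvDupl (PySem.List.slice inlist (some i) (some (i + K + 1))) == true) = true then num
      else if PySem.List.slice inlist (some (i - K)) (some (i + 1))
                = PySem.List.sorted (PySem.List.slice inlist (some (i - K)) (some (i + 1))) (fun x => x) true
              ∧ PySem.List.slice inlist (some i) (some (i + K + 1))
                = PySem.List.sorted (PySem.List.slice inlist (some i) (some (i + K + 1))) (fun x => x) false
      then num ++ [i] else num)
    = (fun (num : List Int) (i : Int) =>
      if (pvDupl (PySem.List.slice inlist (some (i - K)) (some (i + 1))) = false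
          ∧ pvDupl (PySem.List.slice inlist (some i) (some (i + K + 1))) = false)
          ∧ (PySem.List.slice inlist (some (i - K)) (some (i + 1))
                = PySem.List.sorted (PySem.List.slice inlist (some (i - K)) (some (i + 1))) (fun x => x) true
              ∧ PySem.List.slice inlist (some i) (some (i + K + 1))
                = PySem.List.sorted (PySem.List.slice inlist (some i) (some (i + K + 1))) (fun x => x) false)
      then num ++ [i] else num) from by
    funext num i
    cases h1 : pvDupl (PySem.List.slice inlist (some (i - K)) (some (i + 1))) <;>
      cases h2 : pvDupl (PySem.List.slice inlist (some i) (some (i + K + 1))) <;>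
      simp]
  rw [PySem.List.foldl_append_ite_eq_filter]
  rw [List.nil_append]
  apply List.filter_congr
  intro i hi
  rw [PySem.List.mem_pyRange_one] at hi
  have h0i : 0 ≤ i := le_trans (by exact_mod_cast Nat.zero_le K) hi.1
  obtain ⟨I, rfl⟩ : ∃ I : Nat, i = (I : Int) := ⟨i.toNat, (Int.toNat_of_nonneg h0i).symm⟩
  obtain ⟨hKI, hIN⟩ : K ≤ I ∧ I + K < inlist.length := by
    obtain ⟨h1, h2⟩ := hi
    constructor <;> [exact_mod_cast h1; omega]
  -- name the two windows
  have hL : PySem.List.slice inlist (some ((I : Int) - K)) (some ((I : Int) + 1))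
      = (inlist.drop (I - K)).take (K + 1) := by
    rw [show (I : Int) - K = ((I - K : Nat) : Int) from by omega,
        show (I : Int) + 1 = ((I + 1 : Nat) : Int) from by omega,
        PySem.List.slice_natCast]
    congr 1; omega
  have hR : PySem.List.slice inlist (some (I : Int)) (some ((I : Int) + K + 1))
      = (inlist.drop I).take (K + 1) := by
    rw [show (I : Int) + K + 1 = ((I + K + 1 : Nat) : Int) from by omega,
        PySem.List.slice_natCast]
    congr 1; omega
  -- A's test at i ↔ two pairwise-monotone windows
  have hA : ((pvDupl (PySem.List.slice inlist (some ((I : Int) - K)) (some ((I : Int) + 1))) = false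
          ∧ pvDupl (PySem.List.slice inlist (some (I : Int)) (some ((I : Int) + K + 1))) = false)
          ∧ (PySem.List.slice inlist (some ((I : Int) - K)) (some ((I : Int) + 1))
                = PySem.List.sorted (PySem.List.slice inlist (some ((I : Int) - K)) (some ((I : Int) + 1))) (fun x => x) true
              ∧ PySem.List.slice inlist (some (I : Int)) (some ((I : Int) + K + 1))
                = PySem.List.sorted (PySem.List.slice inlist (some (I : Int)) (some ((I : Int) + K + 1))) (fun x => x) false))
      ↔ (((inlist.drop (I - K)).take (K + 1)).Pairwise (· > ·)
          ∧ ((inlist.drop I).take (K + 1)).Pairwise (· < ·)) := by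
    rw [hL, hR, ← cond_desc, ← cond_asc]
    tauto
  -- B's test at i ↔ the same two windows, via the run-length characterisation
  have hdec : PySem.List.pyGetD (pvRuns inlist) (I : Int) 0 = ((decRun inlist I : Nat) : Int) := by
    rw [pvRuns_eq, PySem.List.pyGetD_natCast, PySem.List.getD_map_range _ _ _ _ (by omega)]
  have hinc : PySem.List.pyGetD (pvRuns inlist.reverse).reverse (I : Int) 0
      = ((decRun inlist.reverse (inlist.length - 1 - I) : Nat) : Int) := by
    rw [PySem.List.pyGetD_natCast, pvRuns_eq]
    rw [List.getD_eq_getElem _ 0 (by simp; omega), List.getElem_reverse]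
    rw [← List.getD_eq_getElem _ 0, List.length_map, List.length_range, List.length_reverse]
    rw [PySem.List.getD_map_range _ _ _ _ (by omega)]
  have hBdec : ((K : Int) + 1 ≤ PySem.List.pyGetD (pvRuns inlist) (I : Int) 0)
      ↔ ((inlist.drop (I - K)).take (K + 1)).Pairwise (· > ·) := by
    rw [hdec]
    have h1 : ((K : Int) + 1 ≤ ((decRun inlist I : Nat) : Int)) ↔ K + 1 ≤ decRun inlist I := by
      omega
    rw [h1, decRun_ge_iff inlist K I hKI,
        @pairwise_window_iff (fun a b => b < a) ⟨fun h1 h2 => lt_trans h2 h1⟩ inlist (I - K) K (by omega)]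
    constructor
    · intro h j hj1 hj2; exact h j (by omega) (by omega)
    · intro h j hj1 hj2; exact h j (by omega) (by omega)
  have hBinc : ((K : Int) + 1 ≤ PySem.List.pyGetD (pvRuns inlist.reverse).reverse (I : Int) 0)
      ↔ ((inlist.drop I).take (K + 1)).Pairwise (· < ·) := by
    rw [hinc]
    have h1 : ((K : Int) + 1 ≤ ((decRun inlist.reverse (inlist.length - 1 - I) : Nat) : Int))
        ↔ K + 1 ≤ decRun inlist.reverse (inlist.length - 1 - I) := by omega
    rw [h1, decRun_ge_iff inlist.reverse K (inlist.length - 1 - I) (by omega),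
        pairwise_window_iff (· < ·) inlist I K hIN]
    constructor
    · intro h m hm1 hm2
      have := h (inlist.length - 2 - m) (by omega) (by omega)
      rw [getD_reverse _ _ (by omega), getD_reverse _ _ (by omega)] at this
      rw [show inlist.length - 1 - (inlist.length - 2 - m + 1) = m from by omega,
          show inlist.length - 1 - (inlist.length - 2 - m) = m + 1 from by omega] at this
      exact this
    · intro h j hj1 hj2
      rw [getD_reverse _ _ (by omega), getD_reverse _ _ (by omega)]
      rw [show inlist.length - 1 - (j + 1) = inlist.length - 2 - j from by omega]
      have := h (inlist.length - 2 - j) (by omega) (by omega)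
      rw [show inlist.length - 2 - j + 1 = inlist.length - 1 - j from by omega] at this
      exact this
  rw [← Bool.decide_and, decide_eq_decide]
  rw [hA, hBdec, hBinc]
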